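-- pv_equiv track=rewrite | github.com/deepzsenu/python-dsa | Amazon_Practice/05 HAshing/04. Match specific pattern .py | findSpecificPattern
-- ===== SOURCE A (Python) =====
-- def check(word):
--     d ={}
--     res =""
--     i =0
--     for ch in word:
--         if ch not in d:
--             d[ch] = i
--             i+=1
--         res+=str(d[ch])
--     return res
--
-- def findSpecificPattern(Dict, pattern):
--     #Code here
--     j = []
--     l = len(pattern)
--     h = check(pattern)
--     for word in Dict:
--         if len(word) == l and check(word) == h:
--             j.append(word)
--
--     return j
-- ===== SOURCE B (Python) =====
-- def _isomorphic(w, p):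
--     fwd, bwd = {}, {}
--     for a, b in zip(w, p):
--         if fwd.setdefault(a, b) != b or bwd.setdefault(b, a) != a:
--             return False
--     return True
--
-- def findSpecificPattern(Dict, pattern):
--     return [w for w in Dict
--             if len(w) == len(pattern) and _isomorphic(w, pattern)]
-- ===== Notes on version B (the rewrite author's own statement) =====
-- stated objective: alternative
-- what changed: Instead of precomputing a canonical decimal-encoding string for the pattern and for each word and comparing strings, B tests each equal-length word directly for letter-isomorphism with the pattern in one zip pass maintaining a forward and a backward character mapping, building no encoding strings and exiting a word early at the first mismatch.
-- intended difference: On dictionaries containing an equal-length word that is NOT letter-isomorphic to the pattern but whose concatenated decimal index encoding coincides with the pattern's (possible once 11+ distinct letters make indices multi-digit, e.g. '...kba' vs '...bak' both encoding to '01234567891010'), A wrongly includes that word while B excludes it; B's answer is intended since the function is meant to match words with the pattern's letter structure. — e.g. on findSpecificPattern(["abcdefghijbak"], "abcdefghijkba"): A returns ["abcdefghijbak"], B returns []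
import Mathlib
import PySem

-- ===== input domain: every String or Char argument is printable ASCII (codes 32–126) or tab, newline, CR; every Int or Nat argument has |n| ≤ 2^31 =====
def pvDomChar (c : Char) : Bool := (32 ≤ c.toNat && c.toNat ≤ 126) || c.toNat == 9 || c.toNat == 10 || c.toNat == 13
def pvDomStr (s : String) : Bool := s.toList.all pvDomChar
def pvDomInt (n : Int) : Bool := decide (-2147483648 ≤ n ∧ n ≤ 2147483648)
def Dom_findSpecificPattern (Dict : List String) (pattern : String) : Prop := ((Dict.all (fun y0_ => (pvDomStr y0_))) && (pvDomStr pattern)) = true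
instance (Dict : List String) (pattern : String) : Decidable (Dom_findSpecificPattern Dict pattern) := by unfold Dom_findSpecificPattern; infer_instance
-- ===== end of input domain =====

-- B replaces A's canonical-encoding-string comparison by a direct per-word letter-isomorphism test
-- with a forward and a backward character map (objective: alternative); on encoding-collision inputs
-- (see D_ below) B corrects A.

-- ===== PORT A =====
-- check's string state is ported on the List Char side (exact: a Python str is its character list;
-- res += str(d[ch]) is res ++ PySem.Int.toChars v, and the final == compares the same lists).
def checkFold : List Char → PySem.Dict Char Int → List Char → Int → List Char
  | [], _, res, _ => res
  | ch :: rest, d, res, i =>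
    match d.get? ch with
    | none => checkFold rest (d.insert ch i) (res ++ PySem.Int.toChars i) (i + 1)
    | some v => checkFold rest d (res ++ PySem.Int.toChars v) i

def check (word : List Char) : List Char := checkFold word PySem.Dict.empty [] 0

def findSpecificPattern (Dict : List String) (pattern : String) : List String :=
  let l : Int := PySem.Str.len pattern
  let h : List Char := check pattern.toList
  Dict.foldl (fun j word =>
    if PySem.Str.len word = l ∧ check word.toList = h then j ++ [word] else j) []

-- ===== PORT B =====
-- isoGo ports _isomorphic's loop over zip(w, p) with the two dicts; fwd.setdefault(a, b) != b is
-- ported as its returned value fwd.getD a b compared to b plus its insertion effect fwd.setdefault a b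
-- (when the comparison fails the loop returns False at once, so the insertion is unobservable).
def isoGo : List (Char × Char) → PySem.Dict Char Char → PySem.Dict Char Char → Bool
  | [], _, _ => true
  | (a, b) :: rest, fwd, bwd =>
    if fwd.getD a b ≠ b then false
    else if bwd.getD b a ≠ a then false
    else isoGo rest (fwd.setdefault a b) (bwd.setdefault b a)

def isomorphic (w p : List Char) : Bool :=
  isoGo (w.zip p) PySem.Dict.empty PySem.Dict.empty

def findSpecificPattern_alt (Dict : List String) (pattern : String) : List String :=
  Dict.filter (fun w =>
    decide (PySem.Str.len w = PySem.Str.len pattern ∧ isomorphic w.toList pattern.toList = true))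

-- ===== PRECONDITION & SPEC =====
-- Independent description of A's encoding: the rank of a letter is the number of distinct letters
-- before its first occurrence; the code of a word concatenates the decimal ranks of its letters;
-- the signature of a word maps each letter to its first-occurrence position (equal signatures =
-- letter-isomorphic words).
def pvCode (w : List Char) : List Char :=
  (w.map fun c => PySem.Int.toChars (w.take (w.idxOf c)).dedup.length).flatten
def pvSig (w : List Char) : List Nat := w.map fun c => w.idxOf c

-- On dictionaries containing an equal-length word that is NOT letter-isomorphic to the pattern but
-- whose concatenated decimal rank encoding coincides with the pattern's (possible once multi-digit
-- ranks appear, i.e. 11+ distinct letters), A wrongly includes that word while B excludes it;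
-- B's answer is intended, since the function is meant to match words with the pattern's letter structure.
def D_findSpecificPattern (Dict : List String) (pattern : String) : Prop :=
  ∃ w ∈ Dict, w.toList.length = pattern.toList.length ∧
    pvCode w.toList = pvCode pattern.toList ∧ pvSig w.toList ≠ pvSig pattern.toList

instance (Dict : List String) (pattern : String) : Decidable (D_findSpecificPattern Dict pattern) := by
  unfold D_findSpecificPattern; infer_instance

def Spec_findSpecificPattern (Dict : List String) (pattern : String) (out : List String) : Prop :=
  ¬ D_findSpecificPattern Dict pattern → out = findSpecificPattern_alt Dict pattern
instance (Dict : List String) (pattern : String) (out : List String) : Decidable (Spec_findSpecificPattern Dict pattern out) := by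
  unfold Spec_findSpecificPattern; infer_instance

def pvDiffWitness_findSpecificPattern : List String × String :=
  (["abcdefghijbak"], "abcdefghijkba")
def pvDiffWitnessOut_findSpecificPattern : (List String) × (List String) :=
  (["abcdefghijbak"], [])

-- ===== CLAIM (what is proved, stated in full; the proofs are below) =====
def Claim_unchanged_findSpecificPattern : Prop := ∀ (Dict : List String) (pattern : String), Dom_findSpecificPattern Dict pattern → Spec_findSpecificPattern Dict pattern (findSpecificPattern Dict pattern)
def Claim_changed_findSpecificPattern : Prop := Dom_findSpecificPattern (pvDiffWitness_findSpecificPattern.1) (pvDiffWitness_findSpecificPattern.2) ∧ D_findSpecificPattern (pvDiffWitness_findSpecificPattern.1) (pvDiffWitness_findSpecificPattern.2) ∧ findSpecificPattern (pvDiffWitness_findSpecificPattern.1) (pvDiffWitness_findSpecificPattern.2) = pvDiffWitnessOut_findSpecificPattern.1 ∧ findSpecificPattern_alt (pvDiffWitness_findSpecificPattern.1) (pvDiffWitness_findSpecificPattern.2) = pvDiffWitnessOut_findSpecificPattern.2 ∧ pvDiffWitnessOut_findSpecificPattern.1 ≠ pvDiffWitnessOut_findSpecificPattern.2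
def Claim_exact_findSpecificPattern : Prop := ∀ (Dict : List String) (pattern : String), Dom_findSpecificPattern Dict pattern → D_findSpecificPattern Dict pattern → findSpecificPattern Dict pattern ≠ findSpecificPattern_alt Dict pattern

-- ===== LEMMAS AND PROOFS =====

-- proof-side decomposition of pvCode: the rank of a letter
def pvRank (w : List Char) (c : Char) : Int := ((w.take (w.idxOf c)).dedup.length : Int)

theorem pvCode_eq (w : List Char) :
    pvCode w = (w.map (fun c => PySem.Int.toChars (pvRank w c))).flatten := rfl

-- Positional letter-isomorphism of two equal-length words (proof-side notion tying pvSig,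
-- A's encoding and B's two-map test together).
def pvIso (w p : List Char) : Prop :=
  ∀ k, k < w.length → ∀ j, j < w.length → (w[k]? = w[j]? ↔ p[k]? = p[j]?)

-- idxOf is a lower bound for any position holding the same letter
theorem idxOf_le_of_getElem {w : List Char} {j : Nat} (hj : j < w.length) {c : Char}
    (h : w[j] = c) : w.idxOf c ≤ j := by
  induction w generalizing j with
  | nil => simp at hj
  | cons a t ih =>
    cases j with
    | zero => simp at h; subst h; simp
    | succ j =>
      by_cases hac : a = c
      · simp [hac]
      · rw [List.idxOf_cons_ne _ (by simpa using hac)]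
        have := ih (j := j) (by simpa using hj) (by simpa using h)
        omega

-- signature equality ↔ positional letter-isomorphism
theorem sig_eq_iff_iso {w p : List Char} (hl : w.length = p.length) :
    pvSig w = pvSig p ↔ pvIso w p := by
  have hge : ∀ (u : List Char) (k : Nat) (hk : k < u.length), u.idxOf u[k] < u.length :=
    fun u k hk => List.idxOf_lt_length_of_mem (List.getElem_mem hk)
  constructor
  · intro hs k hk j hj
    have hIdx : ∀ m (hm : m < w.length), w.idxOf w[m] = p.idxOf (p[m]'(hl ▸ hm)) := by
      intro m hm
      have := congrArg (fun l => l[m]?) hs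
      simp only [pvSig, List.getElem?_map] at this
      rw [List.getElem?_eq_getElem hm, List.getElem?_eq_getElem (hl ▸ hm)] at this
      exact Option.some_inj.mp this
    have hj' : j < p.length := hl ▸ hj
    have hk' : k < p.length := hl ▸ hk
    rw [List.getElem?_eq_getElem hk, List.getElem?_eq_getElem hj,
        List.getElem?_eq_getElem hk', List.getElem?_eq_getElem hj']
    simp only [Option.some_inj]
    constructor
    · intro h
      have h1 := hIdx k hk
      have h2 := hIdx j hj
      have e : p.idxOf p[k] = p.idxOf p[j] := by rw [← h1, ← h2, h]
      calc p[k] = p[p.idxOf p[k]]'(hge p k hk') := by rw [List.getElem_idxOf (hge p k hk')]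
        _ = p[p.idxOf p[j]]'(e ▸ hge p k hk') := by congr 1
        _ = p[j] := by rw [List.getElem_idxOf]
    · intro h
      have h1 := hIdx k hk
      have h2 := hIdx j hj
      have e : w.idxOf w[k] = w.idxOf w[j] := by rw [h1, h2, h]
      calc w[k] = w[w.idxOf w[k]]'(hge w k hk) := by rw [List.getElem_idxOf (hge w k hk)]
        _ = w[w.idxOf w[j]]'(e ▸ hge w k hk) := by congr 1
        _ = w[j] := by rw [List.getElem_idxOf]
  · intro hiso
    apply List.ext_getElem (by simp [pvSig, hl])
    intro k h1 h2
    simp only [pvSig, List.getElem_map]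
    have hk : k < w.length := by simpa [pvSig] using h1
    have hk' : k < p.length := hl ▸ hk
    have key : ∀ m (hm : m < w.length),
        (w[m] = w[k]) ↔ (p[m]'(hl ▸ hm) = p[k]'hk') := by
      intro m hm
      have := hiso m hm k hk
      rw [List.getElem?_eq_getElem hm, List.getElem?_eq_getElem hk,
          List.getElem?_eq_getElem (hl ▸ hm), List.getElem?_eq_getElem hk'] at this
      simpa using this
    have ha : w.idxOf w[k] < w.length := hge w k hk
    have hb : p.idxOf p[k] < p.length := hge p k hk'
    apply Nat.le_antisymm
    · apply idxOf_le_of_getElem (c := w[k]) (j := p.idxOf p[k]) (hl ▸ hb)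
      exact ((key _ (hl ▸ hb)).mpr (by rw [List.getElem_idxOf hb]))
    · apply idxOf_le_of_getElem (c := p[k]'hk') (j := w.idxOf w[k]) (hl ▸ ha)
      exact ((key _ ha).mp (by rw [List.getElem_idxOf ha]))

-- the pairs of a list form a partial bijection (same first components ↔ same second components)
def funBoth (l : List (Char × Char)) : Prop :=
  ∀ x ∈ l, ∀ y ∈ l, (x.1 = y.1 ↔ x.2 = y.2)

-- invariant of B's loop: the two dicts record exactly the processed pairs, which form a bijection;
-- the loop accepts iff the whole pair list is a bijection
theorem isoGo_iff : ∀ (rest done : List (Char × Char)) (f g : PySem.Dict Char Char),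
    (∀ a b, f.get? a = some b ↔ (a, b) ∈ done) →
    (∀ a b, g.get? b = some a ↔ (a, b) ∈ done) →
    funBoth done →
    (isoGo rest f g = true ↔ funBoth (done ++ rest)) := by
  intro rest
  induction rest with
  | nil =>
    intro done f g _ _ hfb
    simpa [isoGo] using hfb
  | cons ab rest ih =>
    obtain ⟨a, b⟩ := ab
    intro done f g hf hg hfb
    by_cases h1 : f.getD a b = b
    · by_cases h2 : g.getD b a = a
      · -- both checks pass
        have hstep : isoGo ((a, b) :: rest) f g = isoGo rest (f.setdefault a b) (g.setdefault b a) := by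
          simp [isoGo, h1, h2]
        have hkey : ∀ a' b', (a', b') ∈ done → (a' = a ↔ b' = b) := by
          intro a' b' hm
          constructor
          · intro he; subst he
            have h3 := PySem.Dict.getD_of_get?_eq_some f b ((hf a' b').mpr hm)
            exact h3.symm.trans h1
          · intro he; subst he
            have h3 := PySem.Dict.getD_of_get?_eq_some g a ((hg a' b').mpr hm)
            exact h3.symm.trans h2
        have hfb' : funBoth (done ++ [(a, b)]) := by
          intro x hx y hy
          rcases List.mem_append.mp hx with hx | hx <;> rcases List.mem_append.mp hy with hy | hy
          · exact hfb x hx y hy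
          · obtain ⟨a', b'⟩ := x
            have hy' : y = (a, b) := by simpa using hy
            subst hy'
            simpa using hkey a' b' hx
          · obtain ⟨a', b'⟩ := y
            have hx' : x = (a, b) := by simpa using hx
            subst hx'
            have := hkey a' b' hy
            simp only
            constructor
            · intro he; exact ((this.mp he.symm)).symm
            · intro he; exact ((this.mpr he.symm)).symm
          · have hx' : x = (a, b) := by simpa using hx
            have hy' : y = (a, b) := by simpa using hy
            subst hx'; subst hy'; simp
        have hf' : ∀ a'' b'', (f.setdefault a b).get? a'' = some b'' ↔ (a'', b'') ∈ done ++ [(a, b)] := by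
          intro a'' b''
          by_cases haa : a'' = a
          · subst haa
            rw [PySem.Dict.get?_setdefault_self]
            have hv : (f.get? a'').getD b = b := by
              rw [← PySem.Dict.getD_eq_get?_getD]; exact h1
            rw [hv]
            simp only [List.mem_append, List.mem_singleton, Option.some_inj, Prod.mk.injEq]
            constructor
            · intro he; exact Or.inr (by simp [← he])
            · rintro (hmem | ⟨-, he⟩)
              · have := (hf a'' b'').mpr hmem
                have h3 := PySem.Dict.getD_of_get?_eq_some f b this
                rw [← h3, h1]
              · exact he.symm
          · rw [PySem.Dict.get?_setdefault_of_ne f b haa, hf a'' b'']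
            simp [haa]
        have hg' : ∀ a'' b'', (g.setdefault b a).get? b'' = some a'' ↔ (a'', b'') ∈ done ++ [(a, b)] := by
          intro a'' b''
          by_cases hbb : b'' = b
          · subst hbb
            rw [PySem.Dict.get?_setdefault_self]
            have hv : (g.get? b'').getD a = a := by
              rw [← PySem.Dict.getD_eq_get?_getD]; exact h2
            rw [hv]
            simp only [List.mem_append, List.mem_singleton, Option.some_inj, Prod.mk.injEq]
            constructor
            · intro he; exact Or.inr (by simp [← he])
            · rintro (hmem | ⟨he, -⟩)
              · have := (hg a'' b'').mpr hmem
                have h3 := PySem.Dict.getD_of_get?_eq_some g a this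
                rw [← h3, h2]
              · exact he.symm
          · rw [PySem.Dict.get?_setdefault_of_ne g a hbb, hg a'' b'']
            simp [hbb]
        rw [hstep, ih (done ++ [(a, b)]) _ _ hf' hg' hfb']
        simp
      · -- backward check fails
        obtain ⟨a', hga, hne⟩ : ∃ a', g.get? b = some a' ∧ a' ≠ a := by
          cases hx : g.get? b with
          | none =>
            exfalso; apply h2
            rw [PySem.Dict.getD_eq_get?_getD, hx]; rfl
          | some a' =>
            refine ⟨a', rfl, ?_⟩
            intro he; apply h2
            rw [PySem.Dict.getD_eq_get?_getD, hx, he]; rfl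
        have hL : isoGo ((a, b) :: rest) f g = false := by simp [isoGo, h1, h2]
        rw [hL]
        constructor
        · intro h; cases h
        · intro hfb2
          exfalso; apply hne
          have hmem : (a', b) ∈ done ++ (a, b) :: rest := by
            exact List.mem_append.mpr (Or.inl ((hg a' b).mp hga))
          have hmem2 : (a, b) ∈ done ++ (a, b) :: rest := by simp
          exact (hfb2 (a', b) hmem (a, b) hmem2).mpr rfl
    · -- forward check fails
      obtain ⟨b', hfa, hne⟩ : ∃ b', f.get? a = some b' ∧ b' ≠ b := by
        cases hx : f.get? a with
        | none =>
          exfalso; apply h1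
          rw [PySem.Dict.getD_eq_get?_getD, hx]; rfl
        | some b' =>
          refine ⟨b', rfl, ?_⟩
          intro he; apply h1
          rw [PySem.Dict.getD_eq_get?_getD, hx, he]; rfl
      have hL : isoGo ((a, b) :: rest) f g = false := by simp [isoGo, h1]
      rw [hL]
      constructor
      · intro h; cases h
      · intro hfb2
        exfalso; apply hne
        have hmem : (a, b') ∈ done ++ (a, b) :: rest := by
          exact List.mem_append.mpr (Or.inl ((hf a b').mp hfa))
        have hmem2 : (a, b) ∈ done ++ (a, b) :: rest := by simp
        exact (hfb2 (a, b') hmem (a, b) hmem2).mp rfl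

theorem mem_zip_iff {w p : List Char} (hl : w.length = p.length) (x : Char × Char) :
    x ∈ w.zip p ↔ ∃ k, ∃ h : k < w.length, w[k] = x.1 ∧ p[k]'(hl ▸ h) = x.2 := by
  rw [List.mem_iff_getElem]
  constructor
  · rintro ⟨k, hk, he⟩
    have hk' : k < w.length := by
      rw [List.length_zip, hl, Nat.min_self] at hk; exact hl ▸ hk
    refine ⟨k, hk', ?_, ?_⟩
    · rw [← he, List.getElem_zip]
    · rw [← he, List.getElem_zip]
  · rintro ⟨k, hk, h1, h2⟩
    refine ⟨k, by rw [List.length_zip, hl, Nat.min_self]; exact hl ▸ hk, ?_⟩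
    rw [List.getElem_zip]
    exact Prod.ext h1 h2

theorem funBoth_zip_iff {w p : List Char} (hl : w.length = p.length) :
    funBoth (w.zip p) ↔ pvIso w p := by
  constructor
  · intro hfb k hk j hj
    have hk' : k < p.length := hl ▸ hk
    have hj' : j < p.length := hl ▸ hj
    have := hfb (w[k], p[k]) ((mem_zip_iff hl _).mpr ⟨k, hk, rfl, rfl⟩)
      (w[j], p[j]) ((mem_zip_iff hl _).mpr ⟨j, hj, rfl, rfl⟩)
    simp only at this
    rw [List.getElem?_eq_getElem hk, List.getElem?_eq_getElem hj,
        List.getElem?_eq_getElem hk', List.getElem?_eq_getElem hj']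
    simpa using this
  · intro hiso x hx y hy
    obtain ⟨k, hk, hx1, hx2⟩ := (mem_zip_iff hl x).mp hx
    obtain ⟨j, hj, hy1, hy2⟩ := (mem_zip_iff hl y).mp hy
    have := hiso k hk j hj
    rw [List.getElem?_eq_getElem hk, List.getElem?_eq_getElem hj,
        List.getElem?_eq_getElem (hl ▸ hk), List.getElem?_eq_getElem (hl ▸ hj)] at this
    simp only [Option.some_inj] at this
    rw [← hx1, ← hy1, ← hx2, ← hy2]
    simpa using this

-- B's per-word test decides positional letter-isomorphism
theorem isomorphic_iff_pvIso {w p : List Char} (hl : w.length = p.length) :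
    isomorphic w p = true ↔ pvIso w p := by
  unfold isomorphic
  rw [isoGo_iff (w.zip p) [] PySem.Dict.empty PySem.Dict.empty
    (by intro a b; rw [PySem.Dict.get?_empty]; simp)
    (by intro a b; rw [PySem.Dict.get?_empty]; simp)
    (by intro x hx; cases hx)]
  rw [List.nil_append]
  exact funBoth_zip_iff hl

-- A's loop is insensitive to renaming: equal dict answers + isomorphic remainders give equal results
theorem checkFold_cong : ∀ (v1 v2 : List Char) (d1 d2 : PySem.Dict Char Int) (res : List Char) (i : Int),
    v1.length = v2.length →
    (∀ k (h1 : k < v1.length) (h2 : k < v2.length), d1.get? v1[k] = d2.get? v2[k]) →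
    (∀ k j (hk : k < v1.length) (hj : j < v1.length) (hk2 : k < v2.length) (hj2 : j < v2.length),
      (v1[k] = v1[j] ↔ v2[k] = v2[j])) →
    checkFold v1 d1 res i = checkFold v2 d2 res i := by
  intro v1
  induction v1 with
  | nil => intro v2 d1 d2 res i hl _ _; cases v2 with
    | nil => rfl
    | cons b t => simp at hl
  | cons a t1 ih =>
    intro v2 d1 d2 res i hl hd hiso
    cases v2 with
    | nil => simp at hl
    | cons b t2 =>
      have hd0 := hd 0 (by simp) (by simp)
      simp only [List.getElem_cons_zero] at hd0
      simp only [checkFold]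
      cases hga : d1.get? a with
      | some v =>
        rw [hd0] at hga; rw [hga]
        apply ih
        · simpa using hl
        · intro k hk1 hk2
          have := hd (k+1) (by simpa using Nat.succ_lt_succ hk1) (by simpa using Nat.succ_lt_succ hk2)
          simpa using this
        · intro k j hk hj hk2 hj2
          have := hiso (k+1) (j+1) (by simpa using Nat.succ_lt_succ hk) (by simpa using Nat.succ_lt_succ hj)
            (by simpa using Nat.succ_lt_succ hk2) (by simpa using Nat.succ_lt_succ hj2)
          simpa using this
      | none =>
        rw [hd0] at hga; rw [hga]
        apply ih
        · simpa using hl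
        · intro k hk1 hk2
          rw [PySem.Dict.get?_insert, PySem.Dict.get?_insert]
          have hab := hiso (k+1) 0 (by simpa using Nat.succ_lt_succ hk1) (by simp)
            (by simpa using Nat.succ_lt_succ hk2) (by simp)
          simp only [List.getElem_cons_succ, List.getElem_cons_zero] at hab
          by_cases hc : t1[k] = a
          · rw [if_pos hc, if_pos (hab.mp hc)]
          · rw [if_neg hc, if_neg (fun hh => hc (hab.mpr hh))]
            have := hd (k+1) (by simpa using Nat.succ_lt_succ hk1) (by simpa using Nat.succ_lt_succ hk2)
            simpa using this
        · intro k j hk hj hk2 hj2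
          have := hiso (k+1) (j+1) (by simpa using Nat.succ_lt_succ hk) (by simpa using Nat.succ_lt_succ hj)
            (by simpa using Nat.succ_lt_succ hk2) (by simpa using Nat.succ_lt_succ hj2)
          simpa using this

-- the rank of the next letter relative to the seen prefix, and the code of the remainder
def rankIn (seen : List Char) (c : Char) : Int :=
  if c ∈ seen then ((seen.take (seen.idxOf c)).dedup.length : Int) else (seen.dedup.length : Int)

def codeFrom : List Char → List Char → List Char
  | _, [] => []
  | seen, c :: v => PySem.Int.toChars (rankIn seen c) ++ codeFrom (seen ++ [c]) v

theorem dedup_len_append (seen : List Char) (c : Char) :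
    (seen ++ [c]).dedup.length = if c ∈ seen then seen.dedup.length else seen.dedup.length + 1 := by
  rw [← List.card_toFinset, ← List.card_toFinset]
  have h : (seen ++ [c]).toFinset = insert c seen.toFinset := by simp
  rw [h]
  by_cases hc : c ∈ seen
  · rw [if_pos hc, Finset.insert_eq_self.mpr (by simpa using hc)]
  · rw [if_neg hc, Finset.card_insert_of_notMem (by simpa using hc)]

theorem rankIn_eq_pvRank (seen v : List Char) (c : Char) :
    rankIn seen c = pvRank (seen ++ c :: v) c := by
  unfold rankIn pvRank
  by_cases hc : c ∈ seen
  · rw [if_pos hc, List.idxOf_append_of_mem hc,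
      List.take_append_of_le_length List.idxOf_le_length]
  · rw [if_neg hc, List.idxOf_append_of_notMem hc, List.idxOf_cons_eq _ rfl]
    simp

-- invariant of A's loop: the dict maps each seen letter to its rank, i counts distinct seen letters
theorem checkFold_go : ∀ (v seen : List Char) (d : PySem.Dict Char Int) (res : List Char),
    (∀ c : Char, d.get? c =
      if c ∈ seen then some (((seen.take (seen.idxOf c)).dedup.length : Nat) : Int) else none) →
    checkFold v d res ((seen.dedup.length : Nat) : Int) = res ++ codeFrom seen v := by
  intro v
  induction v with
  | nil => intro seen d res _; simp [checkFold, codeFrom]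
  | cons c v ih =>
    intro seen d res hd
    simp only [checkFold, codeFrom]
    have hmemapp : ∀ c' : Char, c' ∈ seen ++ [c] ↔ c' ∈ seen ∨ c' = c := by simp
    by_cases hc : c ∈ seen
    · simp only [hd c, if_pos hc]
      have hrank : rankIn seen c = ((seen.take (seen.idxOf c)).dedup.length : Int) := by
        unfold rankIn; rw [if_pos hc]
      have hinv : ∀ c' : Char, d.get? c' =
          if c' ∈ seen ++ [c] then some ((((seen ++ [c]).take ((seen ++ [c]).idxOf c')).dedup.length : Nat) : Int) else none := by
        intro c'
        rw [hd c']
        by_cases hc' : c' ∈ seen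
        · rw [if_pos hc', if_pos (by simp [hc'])]
          rw [List.idxOf_append_of_mem hc', List.take_append_of_le_length List.idxOf_le_length]
        · rw [if_neg hc', if_neg (by
            intro hmem
            rcases (hmemapp c').mp hmem with h | h
            · exact hc' h
            · exact hc' (h ▸ hc))]
      have hlen : ((seen.dedup.length : Nat) : Int) = (((seen ++ [c]).dedup.length : Nat) : Int) := by
        rw [dedup_len_append, if_pos hc]
      rw [hlen]
      rw [ih (seen ++ [c]) d (res ++ PySem.Int.toChars ((seen.take (seen.idxOf c)).dedup.length : Int)) hinv]
      rw [hrank, List.append_assoc]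
    · simp only [hd c, if_neg hc]
      have hrank : rankIn seen c = ((seen.dedup.length : Nat) : Int) := by
        unfold rankIn; rw [if_neg hc]
      have hinv : ∀ c' : Char, (d.insert c ((seen.dedup.length : Nat) : Int)).get? c' =
          if c' ∈ seen ++ [c] then some ((((seen ++ [c]).take ((seen ++ [c]).idxOf c')).dedup.length : Nat) : Int) else none := by
        intro c'
        rw [PySem.Dict.get?_insert]
        by_cases hcc : c' = c
        · subst hcc
          rw [if_pos rfl, if_pos (by simp)]
          rw [List.idxOf_append_of_notMem hc, List.idxOf_cons_eq _ rfl]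
          simp
        · rw [if_neg hcc, hd c']
          by_cases hc' : c' ∈ seen
          · rw [if_pos hc', if_pos (by simp [hc'])]
            rw [List.idxOf_append_of_mem hc', List.take_append_of_le_length List.idxOf_le_length]
          · rw [if_neg hc', if_neg (by
              intro hmem
              rcases (hmemapp c').mp hmem with h | h
              · exact hc' h
              · exact hcc h)]
      have hlen : ((seen.dedup.length : Nat) : Int) + 1 = (((seen ++ [c]).dedup.length : Nat) : Int) := by
        rw [dedup_len_append, if_neg hc]; push_cast; ring
      rw [hlen]
      rw [ih (seen ++ [c]) _ (res ++ PySem.Int.toChars ((seen.dedup.length : Nat) : Int)) hinv]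
      rw [hrank, List.append_assoc]

theorem codeFrom_spec : ∀ (v seen : List Char),
    codeFrom seen v = (v.map (fun c => PySem.Int.toChars (pvRank (seen ++ v) c))).flatten := by
  intro v
  induction v with
  | nil => intro seen; simp [codeFrom]
  | cons c v ih =>
    intro seen
    have e : seen ++ c :: v = (seen ++ [c]) ++ v := by simp
    simp only [codeFrom, List.map_cons, List.flatten_cons]
    rw [rankIn_eq_pvRank seen v c, ih (seen ++ [c]), ← e]

theorem check_eq_pvCode (w : List Char) : check w = pvCode w := by
  unfold check
  have h0 : (0 : Int) = ((([] : List Char).dedup.length : Nat) : Int) := by simp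
  rw [h0, checkFold_go w [] PySem.Dict.empty []
    (by intro c; rw [PySem.Dict.get?_empty, if_neg (by simp)])]
  rw [codeFrom_spec w []]
  rw [pvCode_eq]
  simp

-- B's per-word test implies A's per-word test
theorem iso_imp_check {w p : List Char} (hl : w.length = p.length)
    (hiso : pvIso w p) : check w = check p := by
  unfold check
  apply checkFold_cong _ _ _ _ _ _ hl
  · intro k _ _; rw [PySem.Dict.get?_empty, PySem.Dict.get?_empty]
  · intro k j hk hj hk2 hj2
    have := hiso k hk j hj
    rw [List.getElem?_eq_getElem hk, List.getElem?_eq_getElem hj,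
        List.getElem?_eq_getElem (hl ▸ hk), List.getElem?_eq_getElem (hl ▸ hj)] at this
    simpa using this

theorem len_eq_of_strlen {w p : String} (h : PySem.Str.len w = PySem.Str.len p) :
    w.toList.length = p.toList.length := by
  rw [PySem.Str.len_eq, PySem.Str.len_eq] at h
  exact_mod_cast h

theorem findSpecificPattern_eq_filter (Dict : List String) (pattern : String) :
    findSpecificPattern Dict pattern = Dict.filter (fun w =>
      decide (PySem.Str.len w = PySem.Str.len pattern ∧ check w.toList = check pattern.toList)) := by
  unfold findSpecificPattern
  rw [PySem.List.foldl_append_ite_eq_filter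
    (fun w => PySem.Str.len w = PySem.Str.len pattern ∧ check w.toList = check pattern.toList)]
  simp

theorem findSpecificPattern_spec' : ∀ (Dict : List String) (pattern : String),
    ¬ D_findSpecificPattern Dict pattern →
    findSpecificPattern Dict pattern = findSpecificPattern_alt Dict pattern := by
  intro Dict pattern hnD
  unfold D_findSpecificPattern at hnD
  rw [findSpecificPattern_eq_filter]
  unfold findSpecificPattern_alt
  apply List.filter_congr
  intro w hw
  simp only [decide_eq_decide]
  constructor
  · rintro ⟨h1, h2⟩
    refine ⟨h1, ?_⟩
    have hl := len_eq_of_strlen h1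
    have hcode : pvCode w.toList = pvCode pattern.toList := by
      rw [← check_eq_pvCode, ← check_eq_pvCode]; exact h2
    have hsig : pvSig w.toList = pvSig pattern.toList := by
      by_contra hni
      exact hnD ⟨w, hw, hl, hcode, hni⟩
    exact (isomorphic_iff_pvIso hl).mpr ((sig_eq_iff_iso hl).mp hsig)
  · rintro ⟨h1, h2⟩
    have hl := len_eq_of_strlen h1
    exact ⟨h1, iso_imp_check hl ((isomorphic_iff_pvIso hl).mp h2)⟩

theorem findSpecificPattern_tight' : ∀ (Dict : List String) (pattern : String),
    D_findSpecificPattern Dict pattern →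
    findSpecificPattern Dict pattern ≠ findSpecificPattern_alt Dict pattern := by
  intro Dict pattern hD heq
  unfold D_findSpecificPattern at hD
  obtain ⟨w, hw, hlen, hcode, hsig⟩ := hD
  have hniso : ¬ pvIso w.toList pattern.toList :=
    fun hiso => hsig ((sig_eq_iff_iso hlen).mpr hiso)
  rw [findSpecificPattern_eq_filter] at heq
  unfold findSpecificPattern_alt at heq
  set pA := fun w : String =>
    decide (PySem.Str.len w = PySem.Str.len pattern ∧ check w.toList = check pattern.toList) with hpA
  set pB := fun w : String =>
    decide (PySem.Str.len w = PySem.Str.len pattern ∧ isomorphic w.toList pattern.toList = true) with hpB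
  have hmono : ∀ x ∈ Dict, pB x → pA x := by
    intro x _ hx
    rw [hpB] at hx; rw [hpA]
    simp only [decide_eq_true_eq] at hx ⊢
    have hl := len_eq_of_strlen hx.1
    exact ⟨hx.1, iso_imp_check hl ((isomorphic_iff_pvIso hl).mp hx.2)⟩
  have hAw : pA w = true := by
    rw [hpA]; simp only [decide_eq_true_eq]
    constructor
    · rw [PySem.Str.len_eq, PySem.Str.len_eq]; exact_mod_cast hlen
    · rw [check_eq_pvCode, check_eq_pvCode]; exact hcode
  have hBw : pB w = false := by
    rw [hpB]; simp only [decide_eq_false_iff_not, not_and]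
    intro h1 h2
    exact hniso ((isomorphic_iff_pvIso (len_eq_of_strlen h1)).mp h2)
  have hlenEq : Dict.countP pA = Dict.countP pB := by
    rw [List.countP_eq_length_filter, List.countP_eq_length_filter, heq]
  obtain ⟨s, t, hst⟩ := List.mem_iff_append.mp hw
  subst hst
  have h1 := List.countP_mono_left (l := s) (fun x hx => hmono x (by simp [hx]))
  have h2 := List.countP_mono_left (l := t) (fun x hx => hmono x (by simp [hx]))
  simp only [List.countP_append, List.countP_cons, hAw, hBw] at hlenEq
  simp at hlenEq
  omega

-- ===== VERDICT (by name: the statement is the Claim_ definition above) =====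
theorem findSpecificPattern_spec : Claim_unchanged_findSpecificPattern := by
  intro Dict pattern _ hnD
  exact findSpecificPattern_spec' Dict pattern hnD

theorem findSpecificPattern_changed : Claim_changed_findSpecificPattern := by
  unfold Claim_changed_findSpecificPattern; decide

theorem findSpecificPattern_tight : Claim_exact_findSpecificPattern := by
  intro Dict pattern _ hD
  exact findSpecificPattern_tight' Dict pattern hD
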